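-- pv_equiv track=rewrite | github.com/kongusen/AutoReportAI | backend/app/services/agents/orchestration/context_aware_orchestrator.py | _group_results_by_type
-- ===== SOURCE A (Python) =====
-- from typing import Any, Dict, List, Optional, Union, Tuple
--
-- def _group_results_by_type(results: Dict[str, Any]) -> Dict[str, List[Any]]:
--     """按结果类型分组"""
--     groups = {
--         "data_query": [],
--         "analysis": [],
--         "visualization": [],
--         "content": [],
--         "other": []
--     }
--
--     for step_id, result in results.items():
--         if "query" in step_id or "data" in step_id:
--             groups["data_query"].append(result)
--         elif "analysis" in step_id or "analyze" in step_id: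
--             groups["analysis"].append(result)
--         elif "chart" in step_id or "visualization" in step_id:
--             groups["visualization"].append(result)
--         elif "content" in step_id or "generate" in step_id:
--             groups["content"].append(result)
--         else:
--             groups["other"].append(result)
--
--     # 移除空组
--     return {k: v for k, v in groups.items() if v}
-- ===== SOURCE B (Python) =====
-- def _group_results_by_type(results):
--     """按结果类型分组 — category-major rewrite: classify each step_id via a keyword
--     table, then build each group by one filtering pass per category."""
--     table = [
--         ("data_query", ("query", "data")),
--         ("analysis", ("analysis", "analyze")),
--         ("visualization", ("chart", "visualization")),
--         ("content", ("content", "generate")),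
--     ]
--
--     def category(step_id):
--         for name, kws in table:
--             if any(k in step_id for k in kws):
--                 return name
--         return "other"
--
--     order = ["data_query", "analysis", "visualization", "content", "other"]
--     return {name: vals
--             for name in order
--             if (vals := [r for s, r in results.items() if category(s) == name])}
-- ===== Notes on version B (the rewrite author's own statement) =====
-- stated objective: alternative
-- what changed: B is category-major: it classifies a step_id with a data-driven keyword table and builds each output group by a separate filtering pass over the results per category, instead of A's single pass that appends into five pre-seeded dict buckets.
import Mathlib
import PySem

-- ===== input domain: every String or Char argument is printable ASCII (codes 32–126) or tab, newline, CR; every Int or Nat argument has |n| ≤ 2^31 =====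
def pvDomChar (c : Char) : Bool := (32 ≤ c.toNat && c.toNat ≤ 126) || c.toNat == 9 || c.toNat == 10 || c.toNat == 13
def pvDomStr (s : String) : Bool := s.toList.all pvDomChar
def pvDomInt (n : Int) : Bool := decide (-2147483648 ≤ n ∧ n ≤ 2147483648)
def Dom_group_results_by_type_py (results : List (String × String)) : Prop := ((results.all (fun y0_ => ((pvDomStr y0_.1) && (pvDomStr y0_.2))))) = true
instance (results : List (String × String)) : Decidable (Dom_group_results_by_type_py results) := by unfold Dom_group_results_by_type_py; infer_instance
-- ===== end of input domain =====

-- B groups category-major (keyword table + one filtering pass per category) instead of A's single append-into-buckets pass; alternative decomposition, same cost.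


-- ===== PORT A =====
-- loop body of A: the if/elif chain appending `result` into the bucket named by the keywords
def pvStepA (g : PySem.Dict String (List String)) (p : String × String) : PySem.Dict String (List String) :=
  let step_id := p.1
  let result := p.2
  if PySem.Str.isIn "query" step_id || PySem.Str.isIn "data" step_id then
    g.modify "data_query" [] (· ++ [result])
  else if PySem.Str.isIn "analysis" step_id || PySem.Str.isIn "analyze" step_id then
    g.modify "analysis" [] (· ++ [result])
  else if PySem.Str.isIn "chart" step_id || PySem.Str.isIn "visualization" step_id then
    g.modify "visualization" [] (· ++ [result])
  else if PySem.Str.isIn "content" step_id || PySem.Str.isIn "generate" step_id then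
    g.modify "content" [] (· ++ [result])
  else
    g.modify "other" [] (· ++ [result])

def group_results_by_type_py (results : List (String × String)) : List (String × List String) :=
  let groups0 : PySem.Dict String (List String) :=
    PySem.Dict.mk [("data_query", []), ("analysis", []), ("visualization", []), ("content", []), ("other", [])]
  let groups := results.foldl pvStepA groups0
  -- {k: v for k, v in groups.items() if v}
  (groups.items.filter (fun kv => !kv.2.isEmpty))

-- ===== PORT B =====
def pvCatTable : List (String × List String) :=
  [("data_query", ["query", "data"]),
   ("analysis", ["analysis", "analyze"]),
   ("visualization", ["chart", "visualization"]),
   ("content", ["content", "generate"])]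

def pvCategory (step_id : String) : String :=
  ((pvCatTable.find? (fun e => e.2.any (fun k => PySem.Str.isIn k step_id))).map Prod.fst).getD "other"

def group_results_by_type_py_alt (results : List (String × String)) : List (String × List String) :=
  (["data_query", "analysis", "visualization", "content", "other"].map
    (fun name => (name, (results.filter (fun p => pvCategory p.1 == name)).map Prod.snd))).filter
    (fun kv => !kv.2.isEmpty)

-- ===== PRECONDITION & SPEC =====
def Spec_group_results_by_type_py (results : List (String × String)) (out : List (String × List String)) : Prop := out = group_results_by_type_py_alt results
instance (results : List (String × String)) (out : List (String × List String)) : Decidable (Spec_group_results_by_type_py results out) := by unfold Spec_group_results_by_type_py; infer_instance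

-- ===== CLAIM (what is proved, stated in full; the proofs are below) =====
def Claim_equal_group_results_by_type_py : Prop := ∀ (results : List (String × String)), Dom_group_results_by_type_py results → Spec_group_results_by_type_py results (group_results_by_type_py results)

-- ===== LEMMAS AND PROOFS =====
def pvMkd (a1 a2 a3 a4 a5 : List String) : PySem.Dict String (List String) :=
  PySem.Dict.mk [("data_query", a1), ("analysis", a2), ("visualization", a3), ("content", a4), ("other", a5)]

def pvSel (name : String) (rs : List (String × String)) : List String :=
  (rs.filter (fun p => pvCategory p.1 == name)).map Prod.snd

lemma pvStepA_eq (g : PySem.Dict String (List String)) (p : String × String) :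
    pvStepA g p = g.modify (pvCategory p.1) [] (· ++ [p.2]) := by
  unfold pvStepA pvCategory pvCatTable
  cases h1 : (PySem.Str.isIn "query" p.1 || PySem.Str.isIn "data" p.1) <;>
  cases h2 : (PySem.Str.isIn "analysis" p.1 || PySem.Str.isIn "analyze" p.1) <;>
  cases h3 : (PySem.Str.isIn "chart" p.1 || PySem.Str.isIn "visualization" p.1) <;>
  cases h4 : (PySem.Str.isIn "content" p.1 || PySem.Str.isIn "generate" p.1) <;>
  simp only [List.find?, List.any_cons, List.any_nil, Bool.or_false, h1, h2, h3, h4,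
    Option.map_some, Option.map_none, Option.getD_some, Option.getD_none] <;> rfl

lemma pvLoop (rs : List (String × String)) (a1 a2 a3 a4 a5 : List String) :
    rs.foldl pvStepA (pvMkd a1 a2 a3 a4 a5) =
      pvMkd (a1 ++ pvSel "data_query" rs) (a2 ++ pvSel "analysis" rs)
            (a3 ++ pvSel "visualization" rs) (a4 ++ pvSel "content" rs)
            (a5 ++ pvSel "other" rs) := by
  induction rs generalizing a1 a2 a3 a4 a5 with
  | nil => simp [pvSel]
  | cons p t ih =>
    have hc : pvCategory p.1 = "data_query" ∨ pvCategory p.1 = "analysis" ∨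
        pvCategory p.1 = "visualization" ∨ pvCategory p.1 = "content" ∨
        pvCategory p.1 = "other" := by
      unfold pvCategory pvCatTable
      cases h1 : (PySem.Str.isIn "query" p.1 || PySem.Str.isIn "data" p.1) <;>
      cases h2 : (PySem.Str.isIn "analysis" p.1 || PySem.Str.isIn "analyze" p.1) <;>
      cases h3 : (PySem.Str.isIn "chart" p.1 || PySem.Str.isIn "visualization" p.1) <;>
      cases h4 : (PySem.Str.isIn "content" p.1 || PySem.Str.isIn "generate" p.1) <;>
      simp only [List.find?, List.any_cons, List.any_nil, Bool.or_false, h1, h2, h3, h4,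
        Option.map_some, Option.map_none, Option.getD_some, Option.getD_none] <;> simp
    have hmod : ∀ (k : String) (b1 b2 b3 b4 b5 : List String) (r : String),
        k = "data_query" ∨ k = "analysis" ∨ k = "visualization" ∨ k = "content" ∨ k = "other" →
        (pvMkd b1 b2 b3 b4 b5).modify k [] (· ++ [r]) =
          pvMkd (if k = "data_query" then b1 ++ [r] else b1)
                (if k = "analysis" then b2 ++ [r] else b2)
                (if k = "visualization" then b3 ++ [r] else b3)
                (if k = "content" then b4 ++ [r] else b4)
                (if k = "other" then b5 ++ [r] else b5) := by
      rintro k b1 b2 b3 b4 b5 r (rfl | rfl | rfl | rfl | rfl) <;> rfl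
    rw [List.foldl_cons, pvStepA_eq, hmod _ _ _ _ _ _ _ hc, ih]
    have hsel : ∀ name, pvSel name (p :: t) =
        (if pvCategory p.1 = name then [p.2] else []) ++ pvSel name t := by
      intro name
      simp only [pvSel, List.filter_cons]
      by_cases h : pvCategory p.1 = name <;> simp [h]
    simp only [hsel]
    rcases hc with h | h | h | h | h <;>
      simp [h, pvMkd, List.append_assoc]

theorem pvMain (results : List (String × String)) :
    group_results_by_type_py results = group_results_by_type_py_alt results := by
  show (results.foldl pvStepA (pvMkd [] [] [] [] [])).items.filter (fun kv => !kv.2.isEmpty) = _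
  rw [pvLoop]
  simp [pvMkd, group_results_by_type_py_alt, pvSel, List.filter]

-- ===== VERDICT (by name: the statement is the Claim_ definition above) =====
theorem group_results_by_type_py_spec : Claim_equal_group_results_by_type_py := by
  intro results _
  exact pvMain results
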